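-- pv_equiv track=rewrite | github.com/ydb-platform/ydb | contrib/python/great-expectations/great_expectations/expectations/metrics/query_metric_provider.py | has_top_level_token
-- ===== SOURCE A (Python) =====
-- def has_top_level_token(query: str, token: str) -> bool:
--     """Return True if *token* appears at parentheses depth 0 (case-insensitive).
--
--     Tokens nested inside parenthesised subqueries or window-function
--     OVER() clauses are ignored.
--     """
--     upper = query.upper()
--     upper_token = token.upper()
--     depth = 0
--     token_len = len(upper_token)
--     query_len = len(upper)
--     i = 0
--     while i < query_len:
--         char = upper[i]
--         if char == "(":
--             depth += 1
--         elif char == ")":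
--             depth -= 1
--         elif depth == 0 and upper[i : i + token_len] == upper_token:
--             return True
--         i += 1
--     return False
-- ===== SOURCE B (Python) =====
-- def has_top_level_token(query: str, token: str) -> bool:
--     """Return True if *token* appears at parentheses depth 0 (case-insensitive).
--
--     Instead of re-comparing the token at every character, jump between
--     occurrences with str.find and update the paren depth over each skipped
--     segment with str.count.
--     """
--     upper = query.upper()
--     t = token.upper()
--     if t[:1] in ("(", ")"):
--         # a match starting at a paren can never fire (the depth branches win)
--         return False
--     n = len(upper)
--     depth = 0
--     start = 0
--     while True:
--         j = upper.find(t, start)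
--         if j < 0 or j >= n:
--             return False
--         seg = upper[start:j + 1]
--         depth += seg.count("(") - seg.count(")")
--         if depth == 0 and upper[j] not in "()":
--             return True
--         start = j + 1
-- ===== Notes on version B (the rewrite author's own statement) =====
-- stated objective: faster
-- what changed: Replaces A's per-character loop that re-compares the token slice at every non-paren position with a str.find jump between token occurrences, updating the paren depth over each skipped segment with str.count, and an upfront rejection of tokens starting with a paren.
import Mathlib
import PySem

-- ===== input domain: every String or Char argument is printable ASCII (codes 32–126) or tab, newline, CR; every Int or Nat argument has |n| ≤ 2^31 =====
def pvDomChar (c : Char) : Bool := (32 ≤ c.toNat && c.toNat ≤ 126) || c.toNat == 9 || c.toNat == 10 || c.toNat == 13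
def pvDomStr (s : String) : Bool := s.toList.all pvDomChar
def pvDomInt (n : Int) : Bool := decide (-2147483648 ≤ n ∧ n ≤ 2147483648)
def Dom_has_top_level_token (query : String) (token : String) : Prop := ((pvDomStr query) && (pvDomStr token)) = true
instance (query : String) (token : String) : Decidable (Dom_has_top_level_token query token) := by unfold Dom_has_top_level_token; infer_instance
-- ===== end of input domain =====

-- B changes the algorithm: str.find jumps between token occurrences and str.count updates
-- the paren depth over each skipped segment (a timing run measures it faster).

-- ===== PORT A =====
-- the while-loop of A: index i, running depth; upper[i:i+token_len] == upper_token is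
-- ported as (up.drop i).take tok.length = tok (exact: Python slice with 0 ≤ i)
def has_top_level_token_loopA (up tok : List Char) (i : Nat) (depth : Int) : Bool :=
  if _h : i < up.length then
    let c := up.getD i ' '        -- upper[i], always in range since i < query_len
    if c = '(' then has_top_level_token_loopA up tok (i + 1) (depth + 1)
    else if c = ')' then has_top_level_token_loopA up tok (i + 1) (depth - 1)
    else if depth = 0 ∧ (up.drop i).take tok.length = tok then true
    else has_top_level_token_loopA up tok (i + 1) depth
  else false
termination_by up.length - i

def has_top_level_token (query : String) (token : String) : Bool :=
  let up := (PySem.Str.upper query).toList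
  let tok := (PySem.Str.upper token).toList
  has_top_level_token_loopA up tok 0 0

-- ===== PORT B =====
-- the while-loop of B: j = upper.find(t, start) is PySem.Chars.findFrom; the segment
-- upper[start:j+1] is (up.drop start).take (j+1-start) (exact: nonnegative bounds)
def has_top_level_token_loopB (up tok : List Char) (start : Nat) (depth : Int) : Bool :=
  if hs : start ≤ up.length then
    let j := PySem.Chars.findFrom up tok (start : Int) none
    if hj : j < 0 ∨ (up.length : Int) ≤ j then false
    else
      let jn := j.toNat
      let seg := (up.drop start).take (jn + 1 - start)
      let depth' := depth + (seg.count '(' : Int) - (seg.count ')' : Int)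
      if depth' = 0 ∧ up.getD jn ' ' ≠ '(' ∧ up.getD jn ' ' ≠ ')' then true
      else has_top_level_token_loopB up tok (jn + 1) depth'
  else false    -- unreachable from start = 0: start = j+1 ≤ up.length on every call
termination_by up.length + 1 - start
decreasing_by
  have hne : PySem.Chars.findFrom up tok (start : Int) none ≠ -1 := by omega
  have hspec := PySem.Chars.findFrom_natCast_spec up tok start hs hne
  omega

def has_top_level_token_alt (query : String) (token : String) : Bool :=
  let up := (PySem.Str.upper query).toList
  let t := (PySem.Str.upper token).toList
  if t.take 1 = ['('] ∨ t.take 1 = [')'] then false   -- t[:1] in ("(", ")")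
  else has_top_level_token_loopB up t 0 0

-- ===== PRECONDITION & SPEC =====
def Spec_has_top_level_token (query : String) (token : String) (out : Bool) : Prop := out = has_top_level_token_alt query token
instance (query : String) (token : String) (out : Bool) : Decidable (Spec_has_top_level_token query token out) := by unfold Spec_has_top_level_token; infer_instance

-- ===== CLAIM (what is proved, stated in full; the proofs are below) =====
def Claim_equal_has_top_level_token : Prop := ∀ (query : String) (token : String), Dom_has_top_level_token query token → Spec_has_top_level_token query token (has_top_level_token query token)

-- ===== LEMMAS AND PROOFS =====

-- paren depth of the prefix of length i
def pvDepth (up : List Char) (i : Nat) : Int :=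
  ((up.take i).count '(' : Int) - ((up.take i).count ')' : Int)

-- a top-level occurrence of tok at position k
def pvHit (up tok : List Char) (k : Nat) : Prop :=
  k < up.length ∧ up.getD k ' ' ≠ '(' ∧ up.getD k ' ' ≠ ')' ∧
    pvDepth up k = 0 ∧ tok <+: up.drop k

theorem pvDepth_succ (up : List Char) (i : Nat) (h : i < up.length) :
    pvDepth up (i + 1) =
      pvDepth up i + (if up.getD i ' ' = '(' then 1 else 0)
        - (if up.getD i ' ' = ')' then 1 else 0) := by
  have ht : up.take (i + 1) = up.take i ++ [up.getD i ' '] := by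
    rw [List.take_add_one]
    simp [List.getD_eq_getElem?_getD, List.getElem?_eq_getElem h]
  unfold pvDepth
  rw [ht]
  simp [List.count_append, List.count_singleton]
  split_ifs <;> simp_all <;> ring

theorem pvDepth_seg (up : List Char) (a b : Nat) (hab : a ≤ b) :
    pvDepth up b =
      pvDepth up a + (((up.drop a).take (b - a)).count '(' : Int)
        - (((up.drop a).take (b - a)).count ')' : Int) := by
  have h : up.take b = up.take a ++ (up.drop a).take (b - a) := by
    have h2 : b = a + (b - a) := by omega
    rw [h2, List.take_add]
    have h3 : a + (b - a) - a = b - a := by omega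
    rw [h3]
  unfold pvDepth
  rw [h]
  simp [List.count_append]
  ring

theorem pvExists_shift (P : Nat → Prop) (i : Nat) (hi : ¬ P i) :
    ((∃ k, i ≤ k ∧ P k) ↔ (∃ k, i + 1 ≤ k ∧ P k)) := by
  constructor
  · rintro ⟨k, hk, h⟩
    rcases Nat.eq_or_lt_of_le hk with rfl | hlt
    · exact absurd h hi
    · exact ⟨k, hlt, h⟩
  · rintro ⟨k, hk, h⟩
    exact ⟨k, by omega, h⟩

theorem pvExists_shift_many (P : Nat → Prop) (a b : Nat) (hab : a ≤ b)
    (h : ∀ k, a ≤ k → k < b → ¬ P k) :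
    ((∃ k, a ≤ k ∧ P k) ↔ (∃ k, b ≤ k ∧ P k)) := by
  constructor
  · rintro ⟨k, hk, hp⟩
    by_cases hkb : b ≤ k
    · exact ⟨k, hkb, hp⟩
    · exact absurd hp (h k hk (by omega))
  · rintro ⟨k, hk, hp⟩
    exact ⟨k, by omega, hp⟩

theorem pvHit_head (up tok : List Char) (k : Nat) (hk : k < up.length)
    (hp : tok <+: up.drop k) (hne : tok ≠ []) :
    up.getD k ' ' = tok.getD 0 ' ' := by
  obtain ⟨c, rest, rfl⟩ := List.exists_cons_of_ne_nil hne
  have hd : up.drop k = up[k] :: up.drop (k + 1) := List.drop_eq_getElem_cons hk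
  rw [hd] at hp
  obtain ⟨rfl, -⟩ := List.cons_prefix_cons.mp hp
  simp [List.getD_eq_getElem?_getD, List.getElem?_eq_getElem hk]

-- characterization of A's loop
theorem loopA_iff (up tok : List Char) (i : Nat) (depth : Int)
    (hd : depth = pvDepth up i) :
    (has_top_level_token_loopA up tok i depth = true ↔ ∃ k, i ≤ k ∧ pvHit up tok k) := by
  revert hd
  induction i, depth using has_top_level_token_loopA.induct (up := up) (tok := tok) with
  | case1 i depth h c hc ih =>
    intro hd
    rw [has_top_level_token_loopA]
    simp only [dif_pos h]
    rw [if_pos hc]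
    have hcc : up.getD i ' ' = '(' := hc
    rw [ih (by rw [hd, pvDepth_succ up i h, hcc, if_pos rfl, if_neg (by decide)]; ring)]
    exact (pvExists_shift (pvHit up tok) i (fun hhit => hhit.2.1 hc)).symm
  | case2 i depth h c hc1 hc2 ih =>
    intro hd
    rw [has_top_level_token_loopA]
    simp only [dif_pos h]
    rw [if_neg hc1, if_pos hc2]
    have hcc : up.getD i ' ' = ')' := hc2
    rw [ih (by rw [hd, pvDepth_succ up i h, hcc, if_neg (by decide), if_pos rfl]; ring)]
    exact (pvExists_shift (pvHit up tok) i (fun hhit => hhit.2.2.1 hc2)).symm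
  | case3 i depth h c hc1 hc2 hc3 =>
    intro hd
    rw [has_top_level_token_loopA]
    simp only [dif_pos h]
    rw [if_neg hc1, if_neg hc2, if_pos hc3]
    simp only [true_iff]
    refine ⟨i, le_refl i, h, hc1, hc2, by rw [← hd]; exact hc3.1, ?_⟩
    rw [List.prefix_iff_eq_take]
    exact hc3.2.symm
  | case4 i depth h c hc1 hc2 hc3 ih =>
    intro hd
    rw [has_top_level_token_loopA]
    simp only [dif_pos h]
    rw [if_neg hc1, if_neg hc2, if_neg hc3]
    rw [ih (by rw [hd, pvDepth_succ up i h, if_neg hc1, if_neg hc2]; ring)]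
    refine (pvExists_shift (pvHit up tok) i ?_).symm
    intro hhit
    exact hc3 ⟨by rw [hd]; exact hhit.2.2.2.1,
      (List.prefix_iff_eq_take.mp hhit.2.2.2.2).symm⟩
  | case5 i depth h =>
    intro hd
    rw [has_top_level_token_loopA]
    simp only [dif_neg h]
    constructor
    · intro hf; exact absurd hf (by simp)
    · rintro ⟨k, hk, hhit⟩
      exact absurd hhit.1 (by omega)

-- a prefix match beyond start is an infix of the tail from start
theorem pvPrefix_infix (up tok : List Char) (a k : Nat) (hak : a ≤ k)
    (hp : tok <+: up.drop k) : tok <:+: up.drop a := by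
  have h : up.drop k = (up.drop a).drop (k - a) := by
    rw [List.drop_drop]; congr 1; omega
  rw [h] at hp
  exact hp.isInfix.trans ((up.drop a).drop_suffix (k - a)).isInfix

-- characterization of B's loop
theorem loopB_iff (up tok : List Char) (start : Nat) (depth : Int)
    (hd : depth = pvDepth up start) :
    (has_top_level_token_loopB up tok start depth = true ↔ ∃ k, start ≤ k ∧ pvHit up tok k) := by
  revert hd
  induction start, depth using has_top_level_token_loopB.induct (up := up) (tok := tok) with
  | case1 start depth hs j hj =>
    intro hd
    rw [has_top_level_token_loopB, dif_pos hs, dif_pos hj]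
    simp only [Bool.false_eq_true, false_iff]
    rintro ⟨k, hk, hhit⟩
    rcases hj with hj | hj
    · -- j < 0 : findFrom = -1, no occurrence at all
      have hm1 : PySem.Chars.findFrom up tok (start : Int) none = -1 := by
        have := PySem.Chars.findFrom_natCast_spec up tok start hs
        by_contra hne
        have := (this hne).1; omega
      have hno := (PySem.Chars.findFrom_natCast_eq_neg_one_iff up tok start hs).mp hm1
      exact hno (pvPrefix_infix up tok start k hk hhit.2.2.2.2)
    · -- length ≤ j : first occurrence at/after the end; none before it
      have hne : PySem.Chars.findFrom up tok (start : Int) none ≠ -1 := by omega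
      have hspec := PySem.Chars.findFrom_natCast_spec up tok start hs hne
      have hkn := hhit.1
      exact hspec.2.2 k hk (by omega) hhit.2.2.2.2
  | case2 start depth hs j hj jn seg depth' hc =>
    intro hd
    rw [has_top_level_token_loopB, dif_pos hs, dif_neg hj, if_pos hc]
    simp only [true_iff]
    have hne : PySem.Chars.findFrom up tok (start : Int) none ≠ -1 := by omega
    have hspec := PySem.Chars.findFrom_natCast_spec up tok start hs hne
    have hjn : jn < up.length := by simp only [jn]; omega
    have hsj : start ≤ jn := by simp only [jn]; omega
    have hdep : depth' = pvDepth up (jn + 1) := by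
      simp only [depth', seg, hd]
      rw [pvDepth_seg up start (jn + 1) (by omega)]
    refine ⟨jn, hsj, hjn, hc.2.1, hc.2.2, ?_, hspec.2.1⟩
    have h0 : pvDepth up (jn + 1) = pvDepth up jn := by
      rw [pvDepth_succ up jn hjn, if_neg hc.2.1, if_neg hc.2.2]
      ring
    rw [← h0, ← hdep]
    exact hc.1
  | case3 start depth hs j hj jn seg depth' hc ih =>
    intro hd
    rw [has_top_level_token_loopB, dif_pos hs, dif_neg hj, if_neg hc]
    have hne : PySem.Chars.findFrom up tok (start : Int) none ≠ -1 := by omega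
    have hspec := PySem.Chars.findFrom_natCast_spec up tok start hs hne
    have hjn : jn < up.length := by simp only [jn]; omega
    have hsj : start ≤ jn := by simp only [jn]; omega
    have hdep : depth' = pvDepth up (jn + 1) := by
      simp only [depth', seg, hd]
      rw [pvDepth_seg up start (jn + 1) (by omega)]
    rw [ih hdep]
    refine (pvExists_shift_many _ start (jn + 1) (by omega) ?_).symm
    intro k hk hkj hhit
    rcases Nat.lt_or_ge k jn with hlt | hge
    · exact hspec.2.2 k hk (by simp only [jn] at hlt ⊢; omega) hhit.2.2.2.2
    · have hkeq : k = jn := by omega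
      apply hc
      refine ⟨?_, hkeq ▸ hhit.2.1, hkeq ▸ hhit.2.2.1⟩
      rw [hdep, pvDepth_succ up jn hjn, if_neg (hkeq ▸ hhit.2.1), if_neg (hkeq ▸ hhit.2.2.1)]
      have h5 : pvDepth up jn = 0 := hkeq ▸ hhit.2.2.2.1
      rw [h5]
      ring
  | case4 start depth hs =>
    intro hd
    rw [has_top_level_token_loopB, dif_neg hs]
    simp only [Bool.false_eq_true, false_iff]
    rintro ⟨k, hk, hhit⟩
    exact absurd hhit.1 (by omega)

-- the whole function, over raw character lists
theorem pvMain (up tok : List Char) :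
    has_top_level_token_loopA up tok 0 0 =
      (if tok.take 1 = ['('] ∨ tok.take 1 = [')'] then false
       else has_top_level_token_loopB up tok 0 0) := by
  have ha := loopA_iff up tok 0 0 (by simp [pvDepth])
  by_cases hguard : tok.take 1 = ['('] ∨ tok.take 1 = [')']
  · simp only [if_pos hguard]
    rw [← Bool.not_eq_true, ha]
    rintro ⟨k, -, hhit⟩
    have hne : tok ≠ [] := by rintro rfl; simp at hguard
    have hh := pvHit_head up tok k hhit.1 hhit.2.2.2.2 hne
    obtain ⟨c, rest, hcr⟩ := List.exists_cons_of_ne_nil hne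
    rw [hcr] at hguard hh
    simp at hguard hh
    rcases hguard with h | h
    · exact hhit.2.1 (by simp [List.getD_eq_getElem?_getD, hh, h])
    · exact hhit.2.2.1 (by simp [List.getD_eq_getElem?_getD, hh, h])
  · simp only [if_neg hguard]
    have hb := loopB_iff up tok 0 0 (by simp [pvDepth])
    rw [Bool.eq_iff_iff, ha, hb]

-- ===== VERDICT (by name: the statement is the Claim_ definition above) =====
theorem has_top_level_token_spec : Claim_equal_has_top_level_token := by
  intro query token _
  unfold Spec_has_top_level_token has_top_level_token has_top_level_token_alt
  exact pvMain (PySem.Str.upper query).toList (PySem.Str.upper token).toList
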